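-- pv_equiv track=rewrite | github.com/DavMedBBLabs/QA-Initial-Flow-Backend | app/utils/feature_mapping.py | get_feature_info
-- ===== SOURCE A (Python) =====
-- FEATURE_MAPPING = {
--     # Gestión de Información
--     'F-102': {
--         'name': 'Perfil de Usuario',
--         'module': 'Gestión de Información',
--         'hus': [109, 110, 202]
--     },
--     'F-100': {
--         'name': 'Registro, login, validación y recuperar contraseña',
--         'module': 'Gestión de Información',
--         'hus': [129, 303, 360]
--     },
--     'F-373': {
--         'name': 'Gestión de perfil e historial del repartidor',
--         'module': 'Gestión de Información',
--         'hus': [374, 375, 376]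
--     },
--     # Gestión de Productos
--     'F-97': {
--         'name': 'Gestión de Lotes y Productos',
--         'module': 'Gestión de Productos',
--         'hus': [103, 104, 177, 200, 207]
--     },
--     'F-99': {
--         'name': 'Catálogo de Productos e Interacción Visual',
--         'module': 'Gestión de Productos',
--         'hus': [246, 247, 248]
--     },
--     'F-249': {
--         'name': 'Detalle de Productos y Agregado al Carrito',
--         'module': 'Gestión de Productos',
--         'hus': [117, 253]
--     },
--     'F-252': {
--         'name': 'Navegación por Categorías y Búsqueda Flotante',
--         'module': 'Gestión de Productos',
--         'hus': [107, 116, 208]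
--     },
--     # Gestión de Pedidos
--     'F-138': {
--         'name': 'Gestión de estados',
--         'module': 'Gestión de Pedidos',
--         'hus': [114]
--     },
--     'F-255': {
--         'name': 'Carrito y Checkout del Dropshipper',
--         'module': 'Gestión de Pedidos',
--         'hus': [126, 132, 204]
--     },
--     # Gestión de Métricas
--     'F-133': {
--         'name': 'Dashboard Principal',
--         'module': 'Gestión de Métricas',
--         'hus': [135, 136, 137, 203, 309, 310]
--     }
-- }
--
-- def get_feature_info(azure_id_num: int) -> dict:
--     """Busca la información de feature y módulo basado en el azure_id"""
--     for feature_id, feature_info in FEATURE_MAPPING.items():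
--         if azure_id_num in feature_info['hus']:
--             return {
--                 'feature': feature_info['name'],
--                 'module': feature_info['module'],
--                 'feature_id': feature_id
--             }
--     return {'feature': None, 'module': None, 'feature_id': None}
-- ===== SOURCE B (Python) =====
-- FEATURE_MAPPING = {
--     # Gestión de Información
--     'F-102': {
--         'name': 'Perfil de Usuario',
--         'module': 'Gestión de Información',
--         'hus': [109, 110, 202]
--     },
--     'F-100': {
--         'name': 'Registro, login, validación y recuperar contraseña',
--         'module': 'Gestión de Información',
--         'hus': [129, 303, 360]
--     },
--     'F-373': {
--         'name': 'Gestión de perfil e historial del repartidor',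
--         'module': 'Gestión de Información',
--         'hus': [374, 375, 376]
--     },
--     # Gestión de Productos
--     'F-97': {
--         'name': 'Gestión de Lotes y Productos',
--         'module': 'Gestión de Productos',
--         'hus': [103, 104, 177, 200, 207]
--     },
--     'F-99': {
--         'name': 'Catálogo de Productos e Interacción Visual',
--         'module': 'Gestión de Productos',
--         'hus': [246, 247, 248]
--     },
--     'F-249': {
--         'name': 'Detalle de Productos y Agregado al Carrito',
--         'module': 'Gestión de Productos',
--         'hus': [117, 253]
--     },
--     'F-252': {
--         'name': 'Navegación por Categorías y Búsqueda Flotante',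
--         'module': 'Gestión de Productos',
--         'hus': [107, 116, 208]
--     },
--     # Gestión de Pedidos
--     'F-138': {
--         'name': 'Gestión de estados',
--         'module': 'Gestión de Pedidos',
--         'hus': [114]
--     },
--     'F-255': {
--         'name': 'Carrito y Checkout del Dropshipper',
--         'module': 'Gestión de Pedidos',
--         'hus': [126, 132, 204]
--     },
--     'F-133': {
--         'name': 'Dashboard Principal',
--         'module': 'Gestión de Métricas',
--         'hus': [135, 136, 137, 203, 309, 310]
--     }
-- }
--
-- # Reverse index built once at import: HU id -> result dict (first occurrence wins).
-- REVERSE = {}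
-- for _fid, _info in FEATURE_MAPPING.items():
--     for _hu in _info['hus']:
--         REVERSE.setdefault(_hu, {
--             'feature': _info['name'],
--             'module': _info['module'],
--             'feature_id': _fid
--         })
--
-- def get_feature_info(azure_id_num: int) -> dict:
--     """Busca la información de feature y módulo basado en el azure_id"""
--     return REVERSE.get(azure_id_num, {'feature': None, 'module': None, 'feature_id': None})
-- ===== Notes on version B (the rewrite author's own statement) =====
-- stated objective: faster
-- what changed: Replaces A's per-call scan over FEATURE_MAPPING with a reverse index (HU id -> result dict) precomputed once at module load, so each call is a single dict lookup with a default.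
import Mathlib
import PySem

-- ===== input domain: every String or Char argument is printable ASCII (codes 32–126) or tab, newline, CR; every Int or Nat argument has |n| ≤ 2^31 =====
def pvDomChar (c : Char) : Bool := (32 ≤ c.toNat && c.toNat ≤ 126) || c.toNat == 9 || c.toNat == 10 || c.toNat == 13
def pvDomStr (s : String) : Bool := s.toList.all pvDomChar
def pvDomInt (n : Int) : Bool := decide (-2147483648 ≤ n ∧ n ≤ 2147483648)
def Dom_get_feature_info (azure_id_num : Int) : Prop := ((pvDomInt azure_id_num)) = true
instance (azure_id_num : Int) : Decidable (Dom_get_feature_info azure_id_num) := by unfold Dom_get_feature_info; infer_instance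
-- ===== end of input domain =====

-- B replaces A's per-call linear scan of FEATURE_MAPPING with a reverse index (HU id -> result
-- dict) built once at module load, so the function is a single direct lookup (objective: faster
-- per call by a constant mechanism on this fixed table; no claim measured here beyond equivalence).

-- ===== PORT A =====
-- FEATURE_MAPPING as (feature_id, name, module, hus), insertion order
def pvFeatureMapping : List (String × String × String × List Int) := [
  ("F-102", "Perfil de Usuario", "Gestión de Información", [109, 110, 202]),
  ("F-100", "Registro, login, validación y recuperar contraseña", "Gestión de Información", [129, 303, 360]),
  ("F-373", "Gestión de perfil e historial del repartidor", "Gestión de Información", [374, 375, 376]),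
  ("F-97", "Gestión de Lotes y Productos", "Gestión de Productos", [103, 104, 177, 200, 207]),
  ("F-99", "Catálogo de Productos e Interacción Visual", "Gestión de Productos", [246, 247, 248]),
  ("F-249", "Detalle de Productos y Agregado al Carrito", "Gestión de Productos", [117, 253]),
  ("F-252", "Navegación por Categorías y Búsqueda Flotante", "Gestión de Productos", [107, 116, 208]),
  ("F-138", "Gestión de estados", "Gestión de Pedidos", [114]),
  ("F-255", "Carrito y Checkout del Dropshipper", "Gestión de Pedidos", [126, 132, 204]),
  ("F-133", "Dashboard Principal", "Gestión de Métricas", [135, 136, 137, 203, 309, 310])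
]

-- the for-loop of A: scan features in order, return on first hus membership
def pvScanA : List (String × String × String × List Int) → Int → List (String × Option String)
  | [], _ => [("feature", none), ("module", none), ("feature_id", none)]
  | (fid, name, mod, hus) :: rest, n =>
      if n ∈ hus then
        [("feature", some name), ("module", some mod), ("feature_id", some fid)]
      else pvScanA rest n

def get_feature_info (azure_id_num : Int) : List (String × Option String) :=
  pvScanA pvFeatureMapping azure_id_num

-- ===== PORT B =====
-- REVERSE built once by the module-level double loop (setdefault: first occurrence wins)
def pvReverse : PySem.Dict Int (List (String × Option String)) :=
  pvFeatureMapping.foldl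
    (fun d f =>
      f.2.2.2.foldl
        (fun d2 hu =>
          if d2.contains hu then d2
          else d2.insert hu
            [("feature", some f.2.1), ("module", some f.2.2.1), ("feature_id", some f.1)])
        d)
    PySem.Dict.empty

def get_feature_info_alt (azure_id_num : Int) : List (String × Option String) :=
  pvReverse.getD azure_id_num [("feature", none), ("module", none), ("feature_id", none)]

-- ===== PRECONDITION & SPEC =====
def Spec_get_feature_info (azure_id_num : Int) (out : List (String × Option String)) : Prop := out = get_feature_info_alt azure_id_num
instance (azure_id_num : Int) (out : List (String × Option String)) : Decidable (Spec_get_feature_info azure_id_num out) := by unfold Spec_get_feature_info; infer_instance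

-- ===== CLAIM (what is proved, stated in full; the proofs are below) =====
def Claim_equal_get_feature_info : Prop := ∀ (azure_id_num : Int), Dom_get_feature_info azure_id_num → Spec_get_feature_info azure_id_num (get_feature_info azure_id_num)

-- ===== LEMMAS AND PROOFS =====
-- all HU ids in mapping order
def pvAllIds : List Int := [109, 110, 202, 129, 303, 360, 374, 375, 376, 103, 104, 177, 200, 207, 246, 247, 248, 117, 253, 107, 116, 208, 114, 126, 132, 204, 135, 136, 137, 203, 309, 310]

-- the fully built reverse index, as a literal association list
def pvReverseList : List (Int × List (String × Option String)) := [
  ((109 : Int), [("feature", some "Perfil de Usuario"), ("module", some "Gestión de Información"), ("feature_id", some "F-102")]),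
  ((110 : Int), [("feature", some "Perfil de Usuario"), ("module", some "Gestión de Información"), ("feature_id", some "F-102")]),
  ((202 : Int), [("feature", some "Perfil de Usuario"), ("module", some "Gestión de Información"), ("feature_id", some "F-102")]),
  ((129 : Int), [("feature", some "Registro, login, validación y recuperar contraseña"), ("module", some "Gestión de Información"), ("feature_id", some "F-100")]),
  ((303 : Int), [("feature", some "Registro, login, validación y recuperar contraseña"), ("module", some "Gestión de Información"), ("feature_id", some "F-100")]),
  ((360 : Int), [("feature", some "Registro, login, validación y recuperar contraseña"), ("module", some "Gestión de Información"), ("feature_id", some "F-100")]),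
  ((374 : Int), [("feature", some "Gestión de perfil e historial del repartidor"), ("module", some "Gestión de Información"), ("feature_id", some "F-373")]),
  ((375 : Int), [("feature", some "Gestión de perfil e historial del repartidor"), ("module", some "Gestión de Información"), ("feature_id", some "F-373")]),
  ((376 : Int), [("feature", some "Gestión de perfil e historial del repartidor"), ("module", some "Gestión de Información"), ("feature_id", some "F-373")]),
  ((103 : Int), [("feature", some "Gestión de Lotes y Productos"), ("module", some "Gestión de Productos"), ("feature_id", some "F-97")]),
  ((104 : Int), [("feature", some "Gestión de Lotes y Productos"), ("module", some "Gestión de Productos"), ("feature_id", some "F-97")]),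
  ((177 : Int), [("feature", some "Gestión de Lotes y Productos"), ("module", some "Gestión de Productos"), ("feature_id", some "F-97")]),
  ((200 : Int), [("feature", some "Gestión de Lotes y Productos"), ("module", some "Gestión de Productos"), ("feature_id", some "F-97")]),
  ((207 : Int), [("feature", some "Gestión de Lotes y Productos"), ("module", some "Gestión de Productos"), ("feature_id", some "F-97")]),
  ((246 : Int), [("feature", some "Catálogo de Productos e Interacción Visual"), ("module", some "Gestión de Productos"), ("feature_id", some "F-99")]),
  ((247 : Int), [("feature", some "Catálogo de Productos e Interacción Visual"), ("module", some "Gestión de Productos"), ("feature_id", some "F-99")]),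
  ((248 : Int), [("feature", some "Catálogo de Productos e Interacción Visual"), ("module", some "Gestión de Productos"), ("feature_id", some "F-99")]),
  ((117 : Int), [("feature", some "Detalle de Productos y Agregado al Carrito"), ("module", some "Gestión de Productos"), ("feature_id", some "F-249")]),
  ((253 : Int), [("feature", some "Detalle de Productos y Agregado al Carrito"), ("module", some "Gestión de Productos"), ("feature_id", some "F-249")]),
  ((107 : Int), [("feature", some "Navegación por Categorías y Búsqueda Flotante"), ("module", some "Gestión de Productos"), ("feature_id", some "F-252")]),
  ((116 : Int), [("feature", some "Navegación por Categorías y Búsqueda Flotante"), ("module", some "Gestión de Productos"), ("feature_id", some "F-252")]),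
  ((208 : Int), [("feature", some "Navegación por Categorías y Búsqueda Flotante"), ("module", some "Gestión de Productos"), ("feature_id", some "F-252")]),
  ((114 : Int), [("feature", some "Gestión de estados"), ("module", some "Gestión de Pedidos"), ("feature_id", some "F-138")]),
  ((126 : Int), [("feature", some "Carrito y Checkout del Dropshipper"), ("module", some "Gestión de Pedidos"), ("feature_id", some "F-255")]),
  ((132 : Int), [("feature", some "Carrito y Checkout del Dropshipper"), ("module", some "Gestión de Pedidos"), ("feature_id", some "F-255")]),
  ((204 : Int), [("feature", some "Carrito y Checkout del Dropshipper"), ("module", some "Gestión de Pedidos"), ("feature_id", some "F-255")]),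
  ((135 : Int), [("feature", some "Dashboard Principal"), ("module", some "Gestión de Métricas"), ("feature_id", some "F-133")]),
  ((136 : Int), [("feature", some "Dashboard Principal"), ("module", some "Gestión de Métricas"), ("feature_id", some "F-133")]),
  ((137 : Int), [("feature", some "Dashboard Principal"), ("module", some "Gestión de Métricas"), ("feature_id", some "F-133")]),
  ((203 : Int), [("feature", some "Dashboard Principal"), ("module", some "Gestión de Métricas"), ("feature_id", some "F-133")]),
  ((309 : Int), [("feature", some "Dashboard Principal"), ("module", some "Gestión de Métricas"), ("feature_id", some "F-133")]),
  ((310 : Int), [("feature", some "Dashboard Principal"), ("module", some "Gestión de Métricas"), ("feature_id", some "F-133")])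
]

theorem pvReverse_eq : pvReverse = PySem.Dict.mk pvReverseList := by rfl

theorem pvReverseList_keys : ∀ p ∈ pvReverseList, p.1 ∈ pvAllIds := by decide

theorem scanA_nomem (L : List (String × String × String × List Int)) (n : Int)
    (h : ∀ e ∈ L, n ∉ e.2.2.2) :
    pvScanA L n = [("feature", none), ("module", none), ("feature_id", none)] := by
  induction L with
  | nil => rfl
  | cons e t ih =>
      obtain ⟨fid, name, mod, hus⟩ := e
      simp only [pvScanA]
      rw [if_neg (h _ List.mem_cons_self)]
      exact ih fun q hq => h q (List.mem_cons_of_mem _ hq)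

theorem get?_mk_none {β : Type} (l : List (Int × β)) (n : Int)
    (h : ∀ p ∈ l, p.1 ≠ n) : (PySem.Dict.mk l).get? n = none := by
  induction l with
  | nil => rfl
  | cons p t ih =>
      rw [PySem.Dict.get?_mk_cons, if_neg (by simp [h p List.mem_cons_self]),
        ih fun q hq => h q (List.mem_cons_of_mem _ hq)]

-- ===== VERDICT (by name: the statement is the Claim_ definition above) =====
set_option maxHeartbeats 2000000 in
theorem get_feature_info_spec : Claim_equal_get_feature_info := by
  intro n _
  unfold Spec_get_feature_info get_feature_info get_feature_info_alt
  rw [pvReverse_eq]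
  by_cases h : n ∈ pvAllIds
  · fin_cases h <;> rfl
  · have hA : ∀ e ∈ pvFeatureMapping, n ∉ e.2.2.2 := by
      intro e he hm
      apply h
      fin_cases he <;>
        (simp only [pvAllIds, List.mem_cons, List.not_mem_nil, or_false] at hm ⊢; omega)
    have hB : ∀ p ∈ pvReverseList, p.1 ≠ n :=
      fun p hp heq => h (heq ▸ pvReverseList_keys p hp)
    rw [scanA_nomem pvFeatureMapping n hA, PySem.Dict.getD_eq_get?_getD,
      get?_mk_none pvReverseList n hB]
    rfl
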